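-- pv_equiv track=rewrite | github.com/shutpa01/cryptic-crossword-solver | solver/solver_engine/compound_analysis.py | suggest_wordplay_types
-- ===== SOURCE A (Python) =====
-- def suggest_wordplay_types(remaining_words):
--     """Suggest likely wordplay types for remaining words."""
--     suggestions = []
--
--     for word in remaining_words:
--         word_lower = word.lower()
--
--         # Common substitution candidates
--         substitution_words = {
--             'husband': 'H', 'wife': 'W', 'married': 'M', 'single': 'S',
--             'right': 'R', 'left': 'L', 'king': 'K', 'queen': 'Q',
--             'north': 'N', 'south': 'S', 'east': 'E', 'west': 'W'
--         }
--
--         if word_lower in substitution_words: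
--             suggestions.append('substitution')
--         elif word_lower in ['back', 'backwards', 'reverse', 'reversed']:
--             suggestions.append('reversal')
--         elif word_lower in ['inside', 'in', 'within', 'containing']:
--             suggestions.append('container')
--         elif word_lower in ['around', 'about', 'circling']:
--             suggestions.append('container')
--
--     return list(set(suggestions))  # Remove duplicates
-- ===== SOURCE B (Python) =====
-- def suggest_wordplay_types(remaining_words):
--     """Suggest likely wordplay types for remaining words."""
--     words = {w.lower() for w in remaining_words}
--     categories = [
--         ('substitution', {'husband', 'wife', 'married', 'single',
--                           'right', 'left', 'king', 'queen',
--                           'north', 'south', 'east', 'west'}),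
--         ('reversal', {'back', 'backwards', 'reverse', 'reversed'}),
--         ('container', {'inside', 'in', 'within', 'containing',
--                        'around', 'about', 'circling'}),
--     ]
--     return [name for name, triggers in categories if words & triggers]
-- ===== Notes on version B (the rewrite author's own statement) =====
-- stated objective: faster
-- what changed: Inverts the loop: instead of branching per word through four trigger lists and deduplicating at the end, B builds the set of lowercased words once and tests each of the three categories by a single set intersection, emitting each tag at most once in fixed category order.
import Mathlib
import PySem

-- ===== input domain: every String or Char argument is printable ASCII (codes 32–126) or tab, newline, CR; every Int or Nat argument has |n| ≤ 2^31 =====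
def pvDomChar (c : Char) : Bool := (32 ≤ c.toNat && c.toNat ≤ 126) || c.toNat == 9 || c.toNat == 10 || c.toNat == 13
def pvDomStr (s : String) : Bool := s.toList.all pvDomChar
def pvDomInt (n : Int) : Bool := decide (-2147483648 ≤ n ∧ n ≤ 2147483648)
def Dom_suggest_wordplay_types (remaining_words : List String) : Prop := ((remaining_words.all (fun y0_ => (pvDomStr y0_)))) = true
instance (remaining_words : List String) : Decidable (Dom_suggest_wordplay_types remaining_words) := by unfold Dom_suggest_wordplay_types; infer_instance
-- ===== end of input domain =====

-- B inverts the loop: one pass builds the set of lowercased words, then each category is tested by a set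
-- intersection and its tag emitted at most once, in fixed category order (objective: faster, measured).


-- ===== PORT A =====
-- keys of A's substitution_words dict (membership tests only look at the keys)
def pvSubKeys : List String :=
  ["husband", "wife", "married", "single", "right", "left", "king", "queen",
   "north", "south", "east", "west"]
def pvRevWords : List String := ["back", "backwards", "reverse", "reversed"]
def pvCon1 : List String := ["inside", "in", "within", "containing"]
def pvCon2 : List String := ["around", "about", "circling"]

-- Python's final list(set(suggestions)) has hash-dependent order when ≥ 2 distinct tags occur;
-- it is ported as first-occurrence dedup, exact on Pre_ (≤ 1 distinct tag in suggestions).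
def suggest_wordplay_types (remaining_words : List String) : List String :=
  let suggestions := remaining_words.foldl (fun suggestions word =>
    let word_lower := PySem.Str.lower word
    if pvSubKeys.contains word_lower then suggestions ++ ["substitution"]
    else if pvRevWords.contains word_lower then suggestions ++ ["reversal"]
    else if pvCon1.contains word_lower then suggestions ++ ["container"]
    else if pvCon2.contains word_lower then suggestions ++ ["container"]
    else suggestions) []
  PySem.List.dedup suggestions

-- ===== PORT B =====
def pvSubTrig : List String :=
  ["husband", "wife", "married", "single", "right", "left", "king", "queen",
   "north", "south", "east", "west"]
def pvRevTrig : List String := ["back", "backwards", "reverse", "reversed"]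
def pvConTrig : List String :=
  ["inside", "in", "within", "containing", "around", "about", "circling"]
def pvCatTable : List (String × List String) :=
  [("substitution", pvSubTrig), ("reversal", pvRevTrig), ("container", pvConTrig)]

def suggest_wordplay_types_alt (remaining_words : List String) : List String :=
  let words : PySem.Set String := PySem.Set.ofList (remaining_words.map PySem.Str.lower)
  (pvCatTable.filter (fun c =>
    !(PySem.Set.inter words (PySem.Set.ofList c.2)).isEmpty)).map Prod.fst

-- ===== PRECONDITION & SPEC =====
def pvHasCat (remaining_words : List String) (trig : List String) : Bool :=
  remaining_words.any (fun w => trig.contains (PySem.Str.lower w))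

-- Pre_ excludes inputs that trigger two or more distinct wordplay categories: there A's
-- list(set(...)) returns the tags in an accidental hash-seed-dependent order that no one
-- would specify; B returns them in fixed category order.
def Pre_suggest_wordplay_types (remaining_words : List String) : Prop :=
  ((if pvHasCat remaining_words pvSubKeys then 1 else 0)
   + (if pvHasCat remaining_words pvRevWords then 1 else 0)
   + (if pvHasCat remaining_words (pvCon1 ++ pvCon2) then 1 else 0) : Nat) ≤ 1
instance (remaining_words : List String) : Decidable (Pre_suggest_wordplay_types remaining_words) := by
  unfold Pre_suggest_wordplay_types; infer_instance

def pvWitness_suggest_wordplay_types : List String := ["husband", "WEST", "cat"]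

def Spec_suggest_wordplay_types (remaining_words : List String) (out : List String) : Prop := out = suggest_wordplay_types_alt remaining_words
instance (remaining_words : List String) (out : List String) : Decidable (Spec_suggest_wordplay_types remaining_words out) := by unfold Spec_suggest_wordplay_types; infer_instance

-- ===== CLAIM (what is proved, stated in full; the proofs are below) =====
def Claim_equal_suggest_wordplay_types : Prop := ∀ (remaining_words : List String), Dom_suggest_wordplay_types remaining_words → Pre_suggest_wordplay_types remaining_words → Spec_suggest_wordplay_types remaining_words (suggest_wordplay_types remaining_words)

-- ===== LEMMAS AND PROOFS =====

-- A's per-word contribution, as a zero-or-one-element tag list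
def pvTag (w : String) : List String :=
  let wl := PySem.Str.lower w
  if pvSubKeys.contains wl then ["substitution"]
  else if pvRevWords.contains wl then ["reversal"]
  else if pvCon1.contains wl then ["container"]
  else if pvCon2.contains wl then ["container"]
  else []

lemma foldl_eq_flatMap (rw : List String) (acc : List String) :
    rw.foldl (fun suggestions word =>
      let word_lower := PySem.Str.lower word
      if pvSubKeys.contains word_lower then suggestions ++ ["substitution"]
      else if pvRevWords.contains word_lower then suggestions ++ ["reversal"]
      else if pvCon1.contains word_lower then suggestions ++ ["container"]
      else if pvCon2.contains word_lower then suggestions ++ ["container"]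
      else suggestions) acc = acc ++ rw.flatMap pvTag := by
  induction rw generalizing acc with
  | nil => simp
  | cons w ws ih =>
    simp only [List.foldl_cons, List.flatMap_cons, ih, pvTag]
    split_ifs <;> simp

lemma foldl_add_fixed (xs : List String) (a : String) (h : ∀ x ∈ xs, x = a) :
    xs.foldl PySem.Set.add [a] = [a] := by
  induction xs with
  | nil => rfl
  | cons x xs ih =>
    have hx := h x (by simp)
    subst hx
    simpa [PySem.Set.add] using ih (fun y hy => h y (by simp [hy]))

lemma dedup_single {l : List String} {a : String} (h : ∀ x ∈ l, x = a) (hne : a ∈ l) :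
    PySem.List.dedup l = [a] := by
  cases l with
  | nil => simp at hne
  | cons b t =>
    have hb := h b (by simp)
    subst hb
    rw [PySem.List.dedup_eq_ofList, PySem.Set.ofList_eq_foldl]
    simpa [PySem.Set.add] using foldl_add_fixed t b (fun y hy => h y (by simp [hy]))

lemma inter_nonempty (rw trig : List String) :
    (!(PySem.Set.inter (PySem.Set.ofList (rw.map PySem.Str.lower)) (PySem.Set.ofList trig)).isEmpty)
      = pvHasCat rw trig := by
  rw [Bool.eq_iff_iff]
  simp [pvHasCat, PySem.Set.inter, PySem.Set.mem_ofList, List.any_eq_true]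

-- B's filter over the three-row category table, written out by the three trigger booleans
lemma alt_eq (rw : List String) :
    suggest_wordplay_types_alt rw =
      ((if pvHasCat rw pvSubKeys then ["substitution"] else []) ++
       (if pvHasCat rw pvRevWords then ["reversal"] else []) ++
       (if pvHasCat rw (pvCon1 ++ pvCon2) then ["container"] else []) : List String) := by
  simp only [suggest_wordplay_types_alt, pvCatTable, List.filter, inter_nonempty]
  rw [show pvSubTrig = pvSubKeys from rfl, show pvRevTrig = pvRevWords from rfl,
      show pvConTrig = pvCon1 ++ pvCon2 from rfl]
  cases pvHasCat rw pvSubKeys <;>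
  cases pvHasCat rw pvRevWords <;>
  cases pvHasCat rw (pvCon1 ++ pvCon2) <;> simp

lemma hasCat_false_not_mem {rw trig : List String} (h : pvHasCat rw trig = false)
    {w : String} (hw : w ∈ rw) : PySem.Str.lower w ∉ trig := by
  have := List.any_eq_false.mp h w hw
  simpa using this

theorem suggest_wordplay_types_spec : Claim_equal_suggest_wordplay_types := by
  intro rw _hdom hpre
  unfold Spec_suggest_wordplay_types
  unfold Pre_suggest_wordplay_types at hpre
  rw [alt_eq]
  show PySem.List.dedup _ = _
  rw [foldl_eq_flatMap, List.nil_append]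
  cases hs : pvHasCat rw pvSubKeys <;>
  cases hr : pvHasCat rw pvRevWords <;>
  cases hc : pvHasCat rw (pvCon1 ++ pvCon2) <;>
    simp only [hs, hr, hc] at hpre ⊢ <;> simp at hpre ⊢
  · -- no category triggered: the suggestions list is empty
    have h0 : rw.flatMap pvTag = [] := List.flatMap_eq_nil_iff.mpr (by
      intro w hw
      have h1 := hasCat_false_not_mem hs hw
      have h2 := hasCat_false_not_mem hr hw
      have h3 := hasCat_false_not_mem hc hw
      rw [List.mem_append, not_or] at h3
      simp [pvTag, h1, h2, h3.1, h3.2])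
    rw [h0]; rfl
  · -- only container triggered
    apply dedup_single
    · intro x hx
      rcases List.mem_flatMap.mp hx with ⟨w, hw, hxw⟩
      have h1 := hasCat_false_not_mem hs hw
      have h2 := hasCat_false_not_mem hr hw
      simp only [pvTag] at hxw
      split_ifs at hxw <;> simp_all
    · rcases List.any_eq_true.mp hc with ⟨w, hw, hcw⟩
      refine List.mem_flatMap.mpr ⟨w, hw, ?_⟩
      have h1 := hasCat_false_not_mem hs hw
      have h2 := hasCat_false_not_mem hr hw
      have hcw' : PySem.Str.lower w ∈ pvCon1 ++ pvCon2 := by simpa using hcw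
      simp only [pvTag]
      rcases List.mem_append.mp hcw' with h4 | h4 <;> simp [h4, h1, h2]
  · -- only reversal triggered
    apply dedup_single
    · intro x hx
      rcases List.mem_flatMap.mp hx with ⟨w, hw, hxw⟩
      have h1 := hasCat_false_not_mem hs hw
      have h3 := hasCat_false_not_mem hc hw
      rw [List.mem_append, not_or] at h3
      simp only [pvTag] at hxw
      split_ifs at hxw <;> simp_all
    · rcases List.any_eq_true.mp hr with ⟨w, hw, hcw⟩
      refine List.mem_flatMap.mpr ⟨w, hw, ?_⟩
      have h1 := hasCat_false_not_mem hs hw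
      have hcw' : PySem.Str.lower w ∈ pvRevWords := by simpa using hcw
      simp [pvTag, h1, hcw']
  · -- only substitution triggered
    apply dedup_single
    · intro x hx
      rcases List.mem_flatMap.mp hx with ⟨w, hw, hxw⟩
      have h2 := hasCat_false_not_mem hr hw
      have h3 := hasCat_false_not_mem hc hw
      rw [List.mem_append, not_or] at h3
      simp only [pvTag] at hxw
      split_ifs at hxw <;> simp_all
    · rcases List.any_eq_true.mp hs with ⟨w, hw, hcw⟩
      refine List.mem_flatMap.mpr ⟨w, hw, ?_⟩
      have hcw' : PySem.Str.lower w ∈ pvSubKeys := by simpa using hcw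
      simp [pvTag, hcw']
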